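-- pv_equiv track=rewrite | github.com/SeinPierre/cse102 | myjpeg.py | extrapolate
-- ===== SOURCE A (Python) =====
-- def extrapolate(w, h, C, a, b):
--     mat = [ [ None for y in range( w ) ]
--              for x in range( h ) ]
--
--     for j in range(len(C)):
--         for i in range(len(C[j])):
--             x_beg = j * a
--             x_end = min(x_beg + (a-1), w-1)
--             y_beg = i * b
--             y_end = min(y_beg + (b-1), h-1)
--             for x in range(x_beg, x_end):
--                 for y in range(y_beg, y_end):
--                     mat[x][y] = C[j][i]
--
--     return mat
-- ===== SOURCE B (Python) =====
-- def extrapolate(w, h, C, a, b):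
--     mat = [[None] * w for _ in range(h)]
--     for j, blocks in enumerate(C):
--         strip = range(j * a, min(j * a + (a - 1), w - 1))
--         segments = [(range(i * b, min(i * b + (b - 1), h - 1)), v)
--                     for i, v in enumerate(blocks)]
--         if not strip or all(not s for s, _ in segments):
--             continue  # this block-row paints nothing
--         # render the block-row once, then copy it into every row of its strip
--         row = [None] * w
--         for s, v in segments:
--             for y in s:
--                 row[y] = v
--         for x in strip:
--             mat[x] = row[:]
--     return mat
-- ===== Notes on version B (the rewrite author's own statement) =====
-- stated objective: alternative
-- what changed: A scatters every coefficient cell over the matrix with four nested per-cell write loops; B renders each block-row once into a template row and copies that row into every row of the block-row's strip, skipping block-rows that paint nothing. Pre_ excludes exactly the inputs where a block's nonempty strip and nonempty segment paint a cell out of bounds, on which both Pythons raise IndexError.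
import Mathlib
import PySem

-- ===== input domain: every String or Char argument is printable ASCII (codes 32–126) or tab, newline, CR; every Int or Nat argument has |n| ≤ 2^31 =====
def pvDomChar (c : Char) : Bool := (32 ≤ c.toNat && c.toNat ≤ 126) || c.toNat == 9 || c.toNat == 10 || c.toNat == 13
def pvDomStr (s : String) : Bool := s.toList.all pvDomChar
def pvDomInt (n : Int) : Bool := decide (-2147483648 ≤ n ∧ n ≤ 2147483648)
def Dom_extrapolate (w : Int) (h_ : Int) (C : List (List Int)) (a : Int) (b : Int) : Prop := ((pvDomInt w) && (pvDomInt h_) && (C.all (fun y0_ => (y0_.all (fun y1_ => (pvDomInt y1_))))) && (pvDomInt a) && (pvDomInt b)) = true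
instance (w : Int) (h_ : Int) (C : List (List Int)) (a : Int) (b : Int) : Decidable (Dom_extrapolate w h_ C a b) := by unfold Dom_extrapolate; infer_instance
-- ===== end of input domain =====

-- B renders each block-row once as a template row and copies it into every row of the
-- block-row's strip, instead of A's four nested per-cell scatter loops; objective:
-- alternative decomposition, same cost.

-- ===== PORT A =====
-- mat[x][y] = v  (exact for the in-range indices, the only ones reached under Pre_;
-- Python raises IndexError out of range, which Pre_ excludes)
def pvWrite (mat : List (List (Option Int))) (x y : Int) (v : Option Int) : List (List (Option Int)) :=
  PySem.List.pySetD mat x (PySem.List.pySetD (PySem.List.pyGetD mat x []) y v)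

def extrapolate (w : Int) (h_ : Int) (C : List (List Int)) (a : Int) (b : Int) : List (List (Option Int)) :=
  let mat : List (List (Option Int)) :=
    (PySem.List.pyRange 0 h_ 1).map (fun _x =>
      (PySem.List.pyRange 0 w 1).map (fun _y => (none : Option Int)))
  (PySem.List.pyRange 0 (C.length : Int) 1).foldl (fun mat j =>
    (PySem.List.pyRange 0 ((PySem.List.pyGetD C j []).length : Int) 1).foldl (fun mat i =>
      let x_beg := j * a
      let x_end := min (x_beg + (a - 1)) (w - 1)
      let y_beg := i * b
      let y_end := min (y_beg + (b - 1)) (h_ - 1)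
      (PySem.List.pyRange x_beg x_end 1).foldl (fun mat x =>
        (PySem.List.pyRange y_beg y_end 1).foldl (fun mat y =>
          pvWrite mat x y (some (PySem.List.pyGetD (PySem.List.pyGetD C j []) i 0))) mat) mat) mat) mat

-- ===== PORT B =====
-- row[y] = v via pySetD (in range under Pre_); mat[x] = row[:] is pySetD mat x row
-- (the [:] copy is the identity on immutable Lean lists)
def extrapolate_alt (w : Int) (h_ : Int) (C : List (List Int)) (a : Int) (b : Int) : List (List (Option Int)) :=
  let mat : List (List (Option Int)) :=
    (PySem.List.pyRange 0 h_ 1).map (fun _x =>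
      (PySem.List.pyRange 0 w 1).map (fun _y => (none : Option Int)))
  (PySem.List.enumerate C).foldl (fun mat jb =>
    let strip := PySem.List.pyRange (jb.1 * a) (min (jb.1 * a + (a - 1)) (w - 1)) 1
    let segments := (PySem.List.enumerate jb.2).map (fun iv =>
      (PySem.List.pyRange (iv.1 * b) (min (iv.1 * b + (b - 1)) (h_ - 1)) 1, iv.2))
    if strip.isEmpty || segments.all (fun sv => sv.1.isEmpty) then mat
    else
      let row : List (Option Int) :=
        segments.foldl (fun row sv =>
          sv.1.foldl (fun r y => PySem.List.pySetD r y (some sv.2)) row)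
          ((PySem.List.pyRange 0 w 1).map (fun _y => (none : Option Int)))
      strip.foldl (fun m x => PySem.List.pySetD m x row) mat) mat

-- ===== PRECONDITION & SPEC =====
-- Pre_ excludes exactly the inputs on which the Pythons raise IndexError: a coefficient
-- block whose nonempty (capped) row strip and nonempty (capped) column segment paint a
-- cell out of bounds; both A and B raise there and return everywhere else. The Lean
-- ports are totalized with pySetD, so the proof itself holds on all inputs; Pre_ only
-- keeps the claim to the inputs where the Pythons actually return.
def Pre_extrapolate (w : Int) (h_ : Int) (C : List (List Int)) (a : Int) (b : Int) : Prop :=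
  ∀ j < C.length, ∀ i < (C.getD j []).length,
    ((j : Int) * a < min ((j : Int) * a + (a - 1)) (w - 1) ∧
     (i : Int) * b < min ((i : Int) * b + (b - 1)) (h_ - 1)) →
    (min ((j : Int) * a + (a - 1)) (w - 1) ≤ h_ ∧
     min ((i : Int) * b + (b - 1)) (h_ - 1) ≤ w)
instance (w : Int) (h_ : Int) (C : List (List Int)) (a : Int) (b : Int) : Decidable (Pre_extrapolate w h_ C a b) := by unfold Pre_extrapolate; infer_instance

def pvWitness_extrapolate : Int × Int × List (List Int) × Int × Int := (3, 3, [[1]], 2, 2)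

def Spec_extrapolate (w : Int) (h_ : Int) (C : List (List Int)) (a : Int) (b : Int) (out : List (List (Option Int))) : Prop := out = extrapolate_alt w h_ C a b
instance (w : Int) (h_ : Int) (C : List (List Int)) (a : Int) (b : Int) (out : List (List (Option Int))) : Decidable (Spec_extrapolate w h_ C a b out) := by unfold Spec_extrapolate; infer_instance

-- ===== CLAIM (what is proved, stated in full; the proofs are below) =====
def Claim_equal_extrapolate : Prop := ∀ (w : Int) (h_ : Int) (C : List (List Int)) (a : Int) (b : Int), Dom_extrapolate w h_ C a b → Pre_extrapolate w h_ C a b → Spec_extrapolate w h_ C a b (extrapolate w h_ C a b)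

-- ===== LEMMAS AND PROOFS =====
def pvG2 (mat : List (List (Option Int))) (x y : Int) : Option Int :=
  PySem.List.pyGetD (PySem.List.pyGetD mat x []) y none

def pvG1 (row : List (Option Int)) (y : Int) : Option Int :=
  PySem.List.pyGetD row y none

theorem pvGetD_nonneg {α : Type} (xs : List α) {i : Int} (d : α) (h : 0 ≤ i) :
    PySem.List.pyGetD xs i d = xs.getD i.toNat d := by
  rw [show i = ((i.toNat : Nat) : Int) from (Int.toNat_of_nonneg h).symm,
      PySem.List.pyGetD_natCast]
  simp [Int.toNat_of_nonneg h]

theorem getD_set {α : Type} (l : List α) (n k : Nat) (r : α) (d : α) :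
    (l.set n r).getD k d = if k = n ∧ n < l.length then r else l.getD k d := by
  rw [List.getD_eq_getElem?_getD, List.getD_eq_getElem?_getD, List.getElem?_set]
  split_ifs with h1 h2 h3 h4 <;> simp_all

theorem pvWrite_length (mat : List (List (Option Int))) (x y : Int) (v : Option Int) :
    (pvWrite mat x y v).length = mat.length := by
  simp [pvWrite, PySem.List.length_pySetD]

theorem pvWrite_rowlen (mat : List (List (Option Int))) (x y : Int) (v : Option Int)
    (hx : 0 ≤ x) (k : Nat) :
    ((pvWrite mat x y v).getD k []).length = (mat.getD k []).length := by
  unfold pvWrite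
  rw [PySem.List.pySetD_of_nonneg _ _ hx, getD_set]
  split_ifs with h
  · rw [PySem.List.length_pySetD, pvGetD_nonneg _ _ hx, h.1]
  · rfl

theorem pvG2_pvWrite (mat : List (List (Option Int))) (x y x' y' : Int) (v : Option Int)
    (hx : 0 ≤ x) (hy : 0 ≤ y) (hx' : 0 ≤ x') (hy' : 0 ≤ y') :
    pvG2 (pvWrite mat x y v) x' y' =
      (if x' = x ∧ y' = y ∧ x < (mat.length : Int) ∧ y < ((mat.getD x.toNat []).length : Int)
       then v else pvG2 mat x' y') := by
  unfold pvG2 pvWrite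
  rw [PySem.List.pySetD_of_nonneg _ _ hx, PySem.List.pySetD_of_nonneg _ _ hy,
      pvGetD_nonneg _ _ hx, pvGetD_nonneg _ _ hx', pvGetD_nonneg _ _ hx',
      pvGetD_nonneg _ _ hy', pvGetD_nonneg _ _ hy', getD_set]
  by_cases hP : x'.toNat = x.toNat ∧ x.toNat < mat.length
  · rw [if_pos hP, getD_set, hP.1]
    split_ifs with h1 h2 h2 <;> first | rfl | (exfalso; omega)
  · rw [if_neg hP]
    split_ifs with h1
    · exfalso; omega
    · rfl

theorem pvFoldl_id {α β : Type} (L : List β) (m : α) : L.foldl (fun acc _ => acc) m = m := by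
  induction L generalizing m with
  | nil => rfl
  | cons z L ih => rw [List.foldl_cons]; exact ih m

theorem pvRowfold_length (L : List Int) (x : Int) (v : Option Int) (mat : List (List (Option Int))) :
    (L.foldl (fun m y => pvWrite m x y v) mat).length = mat.length := by
  induction L generalizing mat with
  | nil => rfl
  | cons z L ih => rw [List.foldl_cons, ih, pvWrite_length]

theorem pvRowfold_rowlen (L : List Int) (x : Int) (v : Option Int) (mat : List (List (Option Int)))
    (hx : 0 ≤ x) (k : Nat) :
    ((L.foldl (fun m y => pvWrite m x y v) mat).getD k []).length = (mat.getD k []).length := by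
  induction L generalizing mat with
  | nil => rfl
  | cons z L ih => rw [List.foldl_cons, ih, pvWrite_rowlen _ _ _ _ hx]

theorem pvRectfold_length (Lx : List Int) (yb ye : Int) (v : Option Int) (mat : List (List (Option Int))) :
    (Lx.foldl (fun m x => (PySem.List.pyRange yb ye).foldl (fun m2 y => pvWrite m2 x y v) m) mat).length
      = mat.length := by
  induction Lx generalizing mat with
  | nil => rfl
  | cons z L ih => rw [List.foldl_cons, ih, pvRowfold_length]

theorem pvRectfold_rowlen (Lx : List Int) (yb ye : Int) (v : Option Int) (mat : List (List (Option Int)))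
    (hLx : ∀ z ∈ Lx, 0 ≤ z) (k : Nat) :
    ((Lx.foldl (fun m x => (PySem.List.pyRange yb ye).foldl (fun m2 y => pvWrite m2 x y v) m) mat).getD k []).length
      = (mat.getD k []).length := by
  induction Lx generalizing mat with
  | nil => rfl
  | cons z L ih =>
      rw [List.foldl_cons, ih _ (fun u hu => hLx u (List.mem_cons_of_mem z hu)),
          pvRowfold_rowlen _ _ _ _ (hLx z List.mem_cons_self)]

theorem pvG2_rowfold (x yb ye x' y' : Int) (v : Option Int) (mat : List (List (Option Int)))
    (hx : 0 ≤ x) (hyb : 0 ≤ yb) (hx' : 0 ≤ x') (hy' : 0 ≤ y') :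
    pvG2 ((PySem.List.pyRange yb ye).foldl (fun m y => pvWrite m x y v) mat) x' y' =
      (if x' = x ∧ yb ≤ y' ∧ y' < ye ∧ x < (mat.length : Int) ∧ y' < ((mat.getD x.toNat []).length : Int)
       then v else pvG2 mat x' y') := by
  obtain ⟨n, hn⟩ : ∃ n : Nat, (ye - yb).toNat = n := ⟨_, rfl⟩
  induction n generalizing yb mat with
  | zero =>
      rw [PySem.List.pyRange_one_eq_nil (by omega)]
      simp only [List.foldl_nil]
      split_ifs with h
      · exfalso; omega
      · rfl
  | succ n ih =>
      rw [PySem.List.pyRange_one_cons (by omega), List.foldl_cons,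
          ih (yb + 1) (pvWrite mat x yb v) (by omega) (by omega),
          pvWrite_length, pvWrite_rowlen _ _ _ _ hx,
          pvG2_pvWrite _ _ _ _ _ _ hx hyb hx' hy']
      split_ifs <;> first | rfl | (exfalso; omega)

theorem pvG2_rectfold (xb xe yb ye x' y' : Int) (v : Option Int) (mat : List (List (Option Int)))
    (hxb : 0 ≤ xb) (hyb : 0 ≤ yb) (hx' : 0 ≤ x') (hy' : 0 ≤ y') :
    pvG2 ((PySem.List.pyRange xb xe).foldl
        (fun m x => (PySem.List.pyRange yb ye).foldl (fun m2 y => pvWrite m2 x y v) m) mat) x' y' =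
      (if xb ≤ x' ∧ x' < xe ∧ yb ≤ y' ∧ y' < ye ∧ x' < (mat.length : Int) ∧ y' < ((mat.getD x'.toNat []).length : Int)
       then v else pvG2 mat x' y') := by
  obtain ⟨n, hn⟩ : ∃ n : Nat, (xe - xb).toNat = n := ⟨_, rfl⟩
  induction n generalizing xb mat with
  | zero =>
      rw [show PySem.List.pyRange xb xe = [] from PySem.List.pyRange_one_eq_nil (by omega)]
      simp only [List.foldl_nil]
      split_ifs with h
      · exfalso; omega
      · rfl
  | succ n ih =>
      rw [show PySem.List.pyRange xb xe = xb :: PySem.List.pyRange (xb + 1) xe from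
            PySem.List.pyRange_one_cons (by omega), List.foldl_cons,
          ih (xb + 1) _ (by omega) (by omega),
          pvRowfold_length, pvRowfold_rowlen _ _ _ _ hxb,
          pvG2_rowfold _ _ _ _ _ _ _ hxb hyb hx' hy']
      by_cases hxx : x' = xb
      · subst hxx
        split_ifs <;> first | rfl | (exfalso; omega)
      · split_ifs <;> first | rfl | (exfalso; omega)

-- partial gather value: the cell after A has processed all blocks before (J, I)
def pvPCell (w : Int) (h_ : Int) (C : List (List Int)) (a : Int) (b : Int) (J I : Int) (x y : Int) : Option Int :=
  if 1 ≤ a ∧ 1 ≤ b then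
    let j := PySem.Int.floordiv x a
    let i := PySem.Int.floordiv y b
    if (j < J ∨ (j = J ∧ i < I)) ∧ j < (C.length : Int) ∧ i < ((PySem.List.pyGetD C j []).length : Int)
        ∧ x < min (j * a + (a - 1)) (w - 1) ∧ y < min (i * b + (b - 1)) (h_ - 1)
    then some (PySem.List.pyGetD (PySem.List.pyGetD C j []) i 0)
    else none
  else none

theorem pvFloordiv_nonneg {x a : Int} (hx : 0 ≤ x) (ha : 0 < a) : 0 ≤ PySem.Int.floordiv x a := by
  rw [PySem.Int.le_floordiv_iff_mul_le ha, zero_mul]; exact hx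

theorem pvPCell_zero (w h_ : Int) (C : List (List Int)) (a b : Int) (x y : Int)
    (hx : 0 ≤ x) (hy : 0 ≤ y) :
    pvPCell w h_ C a b 0 0 x y = none := by
  unfold pvPCell
  by_cases hab : 1 ≤ a ∧ 1 ≤ b
  · rw [if_pos hab, if_neg]
    rintro ⟨hlex, -⟩
    have h1 : 0 ≤ PySem.Int.floordiv x a := pvFloordiv_nonneg hx (by omega)
    have h2 : 0 ≤ PySem.Int.floordiv y b := pvFloordiv_nonneg hy (by omega)
    omega
  · rw [if_neg hab]

theorem pvPCell_block (w h_ : Int) (C : List (List Int)) (a b : Int) (j : Int) (x y : Int)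
    (hy : 0 ≤ y) :
    pvPCell w h_ C a b j ((PySem.List.pyGetD C j []).length : Int) x y
      = pvPCell w h_ C a b (j + 1) 0 x y := by
  unfold pvPCell
  by_cases hab : 1 ≤ a ∧ 1 ≤ b
  · rw [if_pos hab, if_pos hab]
    apply if_congr _ rfl rfl
    constructor
    · rintro ⟨hlex, h⟩; exact ⟨Or.inl (by omega), h⟩
    · rintro ⟨hlex, h⟩
      refine ⟨?_, h⟩
      rcases hlex with hlt | ⟨heq, hneg⟩
      · rcases lt_or_eq_of_le (by omega : PySem.Int.floordiv x a ≤ j) with h' | h'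
        · exact Or.inl h'
        · exact Or.inr ⟨h', by rw [h'] at h; exact h.2.1⟩
      · have h2 : 0 ≤ PySem.Int.floordiv y b := pvFloordiv_nonneg hy (by omega)
        omega
  · rw [if_neg hab, if_neg hab]

theorem pvPCell_succ_out (w h_ : Int) (C : List (List Int)) (a b : Int) (j i : Int) (x y : Int)
    (hout : ¬(j * a ≤ x ∧ x < min (j * a + (a - 1)) (w - 1) ∧
              i * b ≤ y ∧ y < min (i * b + (b - 1)) (h_ - 1))) :
    pvPCell w h_ C a b j i x y = pvPCell w h_ C a b j (i + 1) x y := by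
  unfold pvPCell
  by_cases hab : 1 ≤ a ∧ 1 ≤ b
  · rw [if_pos hab, if_pos hab]
    apply if_congr _ rfl rfl
    constructor
    · rintro ⟨hlex, h⟩
      refine ⟨?_, h⟩
      rcases hlex with h' | ⟨e, hi⟩
      · exact Or.inl h'
      · exact Or.inr ⟨e, by omega⟩
    · rintro ⟨hlex, h⟩
      refine ⟨?_, h⟩
      rcases hlex with h' | ⟨e, hi⟩
      · exact Or.inl h'
      · rcases lt_or_eq_of_le (by omega : PySem.Int.floordiv y b ≤ i) with h'' | h''
        · exact Or.inr ⟨e, h''⟩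
        · exfalso
          apply hout
          have hxa : j * a ≤ x := by
            rw [← e]; rw [← PySem.Int.le_floordiv_iff_mul_le (by omega : (0:Int) < a)]
          have hyb : i * b ≤ y := by
            rw [← h'']; rw [← PySem.Int.le_floordiv_iff_mul_le (by omega : (0:Int) < b)]
          rw [e, h''] at h
          exact ⟨hxa, h.2.2.1, hyb, h.2.2.2⟩
  · rw [if_neg hab, if_neg hab]

def pvGood (w : Int) (h_ : Int) (C : List (List Int)) (a : Int) (b : Int) (J I : Int)
    (mat : List (List (Option Int))) : Prop :=
  mat.length = h_.toNat ∧ (∀ k : Nat, k < mat.length → (mat.getD k []).length = w.toNat) ∧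
  ∀ x y : Int, 0 ≤ x → x < h_ → 0 ≤ y → y < w →
    pvG2 mat x y = pvPCell w h_ C a b J I x y

theorem pvStep (w h_ : Int) (C : List (List Int)) (a b : Int) (j i : Int)
    (hj0 : 0 ≤ j) (hj : j < (C.length : Int))
    (hi0 : 0 ≤ i) (hi : i < ((PySem.List.pyGetD C j []).length : Int))
    (mat : List (List (Option Int))) (hG : pvGood w h_ C a b j i mat) :
    pvGood w h_ C a b j (i + 1)
      ((PySem.List.pyRange (j * a) (min (j * a + (a - 1)) (w - 1))).foldl
        (fun m x => (PySem.List.pyRange (i * b) (min (i * b + (b - 1)) (h_ - 1))).foldl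
          (fun m2 y => pvWrite m2 x y (some (PySem.List.pyGetD (PySem.List.pyGetD C j []) i 0))) m) mat) := by
  obtain ⟨hlen, hrow, hpt⟩ := hG
  by_cases hnex : j * a < min (j * a + (a - 1)) (w - 1)
  · by_cases hney : i * b < min (i * b + (b - 1)) (h_ - 1)
    · -- nonempty rectangle: a ≥ 2, b ≥ 2, corners nonnegative
      have ha2 : 2 ≤ a := by omega
      have hb2 : 2 ≤ b := by omega
      have hxb0 : 0 ≤ j * a := mul_nonneg hj0 (by omega)
      have hyb0 : 0 ≤ i * b := mul_nonneg hi0 (by omega)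
      have hmem : ∀ z ∈ PySem.List.pyRange (j * a) (min (j * a + (a - 1)) (w - 1)), 0 ≤ z := by
        intro z hz; rw [PySem.List.mem_pyRange_one] at hz; omega
      refine ⟨by rw [pvRectfold_length, hlen], ?_, ?_⟩
      · intro k hk
        rw [pvRectfold_length] at hk
        rw [pvRectfold_rowlen _ _ _ _ _ hmem]
        exact hrow k hk
      · intro x y hx hx2 hy hy2
        rw [pvG2_rectfold _ _ _ _ _ _ _ _ hxb0 hyb0 hx hy, hpt x y hx hx2 hy hy2]
        have hb1 : x < (mat.length : Int) := by rw [hlen]; omega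
        have hb2' : y < ((mat.getD x.toNat []).length : Int) := by
          rw [hrow x.toNat (by omega)]; omega
        by_cases hin : j * a ≤ x ∧ x < min (j * a + (a - 1)) (w - 1) ∧
            i * b ≤ y ∧ y < min (i * b + (b - 1)) (h_ - 1)
        · rw [if_pos ⟨hin.1, hin.2.1, hin.2.2.1, hin.2.2.2, hb1, hb2'⟩]
          have hja : (j + 1) * a = j * a + a := by ring
          have hib : (i + 1) * b = i * b + b := by ring
          have hdx : PySem.Int.floordiv x a = j :=
            (PySem.Int.floordiv_eq_iff_of_pos (by omega)).2 ⟨hin.1, by omega⟩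
          have hdy : PySem.Int.floordiv y b = i :=
            (PySem.Int.floordiv_eq_iff_of_pos (by omega)).2 ⟨hin.2.2.1, by omega⟩
          unfold pvPCell
          rw [if_pos ⟨by omega, by omega⟩]
          rw [hdx, hdy, if_pos ⟨Or.inr ⟨rfl, by omega⟩, hj, hi, hin.2.1, hin.2.2.2⟩]
        · rw [if_neg (fun hc => hin ⟨hc.1, hc.2.1, hc.2.2.1, hc.2.2.2.1⟩)]
          exact pvPCell_succ_out w h_ C a b j i x y hin
    · -- empty y-range: nothing is written
      rw [show PySem.List.pyRange (i * b) (min (i * b + (b - 1)) (h_ - 1)) = [] from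
            PySem.List.pyRange_one_eq_nil (by omega)]
      simp only [List.foldl_nil]
      rw [pvFoldl_id]
      refine ⟨hlen, hrow, ?_⟩
      intro x y hx hx2 hy hy2
      rw [hpt x y hx hx2 hy hy2]
      exact pvPCell_succ_out w h_ C a b j i x y (by omega)
  · -- empty x-range: nothing is written
    rw [show PySem.List.pyRange (j * a) (min (j * a + (a - 1)) (w - 1)) = [] from
          PySem.List.pyRange_one_eq_nil (by omega)]
    simp only [List.foldl_nil]
    refine ⟨hlen, hrow, ?_⟩
    intro x y hx hx2 hy hy2
    rw [hpt x y hx hx2 hy hy2]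
    exact pvPCell_succ_out w h_ C a b j i x y (by omega)

theorem pvInnerFold (w h_ : Int) (C : List (List Int)) (a b : Int) (j : Int)
    (hj0 : 0 ≤ j) (hj : j < (C.length : Int)) (n : Nat)
    (hn : (n : Int) ≤ ((PySem.List.pyGetD C j []).length : Int))
    (mat : List (List (Option Int))) (hG : pvGood w h_ C a b j 0 mat) :
    pvGood w h_ C a b j (n : Int)
      ((PySem.List.pyRange 0 (n : Int)).foldl
        (fun m i => (PySem.List.pyRange (j * a) (min (j * a + (a - 1)) (w - 1))).foldl
          (fun m2 x => (PySem.List.pyRange (i * b) (min (i * b + (b - 1)) (h_ - 1))).foldl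
            (fun m3 y => pvWrite m3 x y (some (PySem.List.pyGetD (PySem.List.pyGetD C j []) i 0))) m2) m) mat) := by
  induction n with
  | zero =>
      rw [show PySem.List.pyRange 0 ((0 : Nat) : Int) = [] from
            PySem.List.pyRange_one_eq_nil (by simp)]
      simpa using hG
  | succ n ih =>
      rw [show ((n + 1 : Nat) : Int) = (n : Int) + 1 from by push_cast; ring,
          PySem.List.pyRange_one_succ_right (by positivity), List.foldl_append,
          List.foldl_cons, List.foldl_nil]
      exact pvStep w h_ C a b j (n : Int) hj0 hj (by positivity) (by omega) _
        (ih (by omega))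

theorem pvGood_shift (w h_ : Int) (C : List (List Int)) (a b : Int) (j : Int)
    (mat : List (List (Option Int)))
    (hG : pvGood w h_ C a b j ((PySem.List.pyGetD C j []).length : Int) mat) :
    pvGood w h_ C a b (j + 1) 0 mat := by
  obtain ⟨h1, h2, h3⟩ := hG
  exact ⟨h1, h2, fun x y hx hx2 hy hy2 =>
    (h3 x y hx hx2 hy hy2).trans (pvPCell_block w h_ C a b j x y hy)⟩

theorem pvOuterFold (w h_ : Int) (C : List (List Int)) (a b : Int) (n : Nat)
    (hn : n ≤ C.length)
    (mat : List (List (Option Int))) (hG : pvGood w h_ C a b 0 0 mat) :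
    pvGood w h_ C a b (n : Int) 0
      ((PySem.List.pyRange 0 (n : Int)).foldl
        (fun m j => (PySem.List.pyRange 0 ((PySem.List.pyGetD C j []).length : Int)).foldl
          (fun m2 i => (PySem.List.pyRange (j * a) (min (j * a + (a - 1)) (w - 1))).foldl
            (fun m3 x => (PySem.List.pyRange (i * b) (min (i * b + (b - 1)) (h_ - 1))).foldl
              (fun m4 y => pvWrite m4 x y (some (PySem.List.pyGetD (PySem.List.pyGetD C j []) i 0))) m3) m2) m) mat) := by
  induction n with
  | zero =>
      rw [show PySem.List.pyRange 0 ((0 : Nat) : Int) = [] from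
            PySem.List.pyRange_one_eq_nil (by simp)]
      simpa using hG
  | succ n ih =>
      rw [show ((n + 1 : Nat) : Int) = (n : Int) + 1 from by push_cast; ring,
          PySem.List.pyRange_one_succ_right (by positivity), List.foldl_append,
          List.foldl_cons, List.foldl_nil]
      exact pvGood_shift w h_ C a b (n : Int) _
        (pvInnerFold w h_ C a b (n : Int) (by positivity) (by omega)
          ((PySem.List.pyGetD C (n : Int) []).length) (by omega) _ (ih (by omega)))

theorem pvInit (w h_ : Int) (C : List (List Int)) (a b : Int) :
    pvGood w h_ C a b 0 0
      ((PySem.List.pyRange 0 h_).map (fun _ => (PySem.List.pyRange 0 w).map (fun _ => (none : Option Int)))) := by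
  refine ⟨by simp [PySem.List.length_pyRange_one], ?_, ?_⟩
  · intro k hk
    simp only [List.length_map, PySem.List.length_pyRange_one] at hk
    rw [List.getD_eq_getElem _ _ (by simpa [PySem.List.length_pyRange_one] using hk),
        List.getElem_map]
    simp [PySem.List.length_pyRange_one]
  · intro x y hx hx2 hy hy2
    unfold pvG2
    rw [PySem.List.pyGetD_map_pyRange_of_nonneg _ h_ x [] hx hx2,
        PySem.List.pyGetD_map_pyRange_of_nonneg _ w y none hy hy2,
        pvPCell_zero w h_ C a b x y hx hy]

-- ---------- B-side: the template row ----------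

-- partial gather value of the template row for block-row j after its first I segments
def pvRC (h_ b : Int) (blocks : List Int) (I : Int) (y : Int) : Option Int :=
  if 1 ≤ b then
    let i := PySem.Int.floordiv y b
    if i < I ∧ i < (blocks.length : Int) ∧ y < min (i * b + (b - 1)) (h_ - 1)
    then some (PySem.List.pyGetD blocks i 0)
    else none
  else none

theorem pvRC_succ_out (h_ b : Int) (blocks : List Int) (i : Int) (y : Int)
    (hout : ¬(i * b ≤ y ∧ y < min (i * b + (b - 1)) (h_ - 1))) :
    pvRC h_ b blocks i y = pvRC h_ b blocks (i + 1) y := by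
  unfold pvRC
  by_cases hb : 1 ≤ b
  · rw [if_pos hb, if_pos hb]
    apply if_congr _ rfl rfl
    constructor
    · rintro ⟨h1, h⟩; exact ⟨by omega, h⟩
    · rintro ⟨h1, h⟩
      rcases lt_or_eq_of_le (by omega : PySem.Int.floordiv y b ≤ i) with h'' | h''
      · exact ⟨h'', h⟩
      · exfalso
        apply hout
        have hyb : i * b ≤ y := by
          rw [← h'']; rw [← PySem.Int.le_floordiv_iff_mul_le (by omega : (0:Int) < b)]
        rw [h''] at h
        exact ⟨hyb, h.2⟩
  · rw [if_neg hb, if_neg hb]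

theorem pvG1_setfold (yb ye y' : Int) (v : Option Int) (row : List (Option Int))
    (hyb : 0 ≤ yb) (hy' : 0 ≤ y') :
    pvG1 ((PySem.List.pyRange yb ye).foldl (fun r y => PySem.List.pySetD r y v) row) y' =
      (if yb ≤ y' ∧ y' < ye ∧ y' < (row.length : Int) then v else pvG1 row y') := by
  obtain ⟨n, hn⟩ : ∃ n : Nat, (ye - yb).toNat = n := ⟨_, rfl⟩
  induction n generalizing yb row with
  | zero =>
      rw [PySem.List.pyRange_one_eq_nil (by omega)]
      simp only [List.foldl_nil]
      split_ifs with h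
      · exfalso; omega
      · rfl
  | succ n ih =>
      rw [PySem.List.pyRange_one_cons (by omega), List.foldl_cons,
          ih (yb + 1) (PySem.List.pySetD row yb v) (by omega) (by omega)]
      unfold pvG1
      rw [PySem.List.length_pySetD, PySem.List.pySetD_of_nonneg _ _ hyb,
          pvGetD_nonneg _ _ hy', pvGetD_nonneg _ _ hy', getD_set]
      split_ifs <;> first | rfl | (exfalso; omega)

theorem pvSetfold_length (L : List Int) (v : Option Int) (row : List (Option Int)) :
    (L.foldl (fun r y => PySem.List.pySetD r y v) row).length = row.length := by
  induction L generalizing row with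
  | nil => rfl
  | cons z L ih => rw [List.foldl_cons, ih, PySem.List.length_pySetD]

def pvRGood (w h_ b : Int) (blocks : List Int) (I : Int) (row : List (Option Int)) : Prop :=
  row.length = w.toNat ∧
  ∀ y : Int, 0 ≤ y → y < w → pvG1 row y = pvRC h_ b blocks I y

theorem pvRStep (w h_ b : Int) (blocks : List Int) (i : Int)
    (hi0 : 0 ≤ i) (hi : i < (blocks.length : Int))
    (row : List (Option Int)) (hG : pvRGood w h_ b blocks i row) :
    pvRGood w h_ b blocks (i + 1)
      ((PySem.List.pyRange (i * b) (min (i * b + (b - 1)) (h_ - 1))).foldl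
        (fun r y => PySem.List.pySetD r y (some (PySem.List.pyGetD blocks i 0))) row) := by
  obtain ⟨hlen, hpt⟩ := hG
  by_cases hney : i * b < min (i * b + (b - 1)) (h_ - 1)
  · have hb2 : 2 ≤ b := by omega
    have hyb0 : 0 ≤ i * b := mul_nonneg hi0 (by omega)
    refine ⟨by rw [pvSetfold_length, hlen], ?_⟩
    intro y hy hy2
    rw [pvG1_setfold _ _ _ _ _ hyb0 hy, hpt y hy hy2]
    by_cases hin : i * b ≤ y ∧ y < min (i * b + (b - 1)) (h_ - 1)
    · rw [if_pos ⟨hin.1, hin.2, by rw [hlen]; omega⟩]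
      have hib : (i + 1) * b = i * b + b := by ring
      have hdy : PySem.Int.floordiv y b = i :=
        (PySem.Int.floordiv_eq_iff_of_pos (by omega)).2 ⟨hin.1, by omega⟩
      unfold pvRC
      rw [if_pos (by omega : (1:Int) ≤ b), hdy,
          if_pos ⟨by omega, hi, hin.2⟩]
    · rw [if_neg (fun hc => hin ⟨hc.1, hc.2.1⟩)]
      exact pvRC_succ_out h_ b blocks i y hin
  · rw [PySem.List.pyRange_one_eq_nil (by omega)]
    simp only [List.foldl_nil]
    refine ⟨hlen, ?_⟩
    intro y hy hy2
    rw [hpt y hy hy2]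
    exact pvRC_succ_out h_ b blocks i y (by omega)

theorem pvRC_zero (h_ b : Int) (blocks : List Int) (y : Int) (hy : 0 ≤ y) :
    pvRC h_ b blocks 0 y = none := by
  unfold pvRC
  by_cases hb : 1 ≤ b
  · rw [if_pos hb, if_neg]
    rintro ⟨h1, -⟩
    have := pvFloordiv_nonneg hy (by omega : (0:Int) < b)
    omega
  · rw [if_neg hb]

theorem pvRInit (w h_ b : Int) (blocks : List Int) :
    pvRGood w h_ b blocks 0 ((PySem.List.pyRange 0 w).map (fun _ => (none : Option Int))) := by
  refine ⟨by simp [PySem.List.length_pyRange_one], ?_⟩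
  intro y hy hy2
  unfold pvG1
  rw [PySem.List.pyGetD_map_pyRange_of_nonneg _ w y none hy hy2, pvRC_zero h_ b blocks y hy]

theorem pvRFold (w h_ b : Int) (blocks : List Int) (n : Nat) (hn : n ≤ blocks.length) :
    pvRGood w h_ b blocks (n : Int)
      ((PySem.List.pyRange 0 (n : Int)).foldl
        (fun r i => (PySem.List.pyRange (i * b) (min (i * b + (b - 1)) (h_ - 1))).foldl
          (fun r2 y => PySem.List.pySetD r2 y (some (PySem.List.pyGetD blocks i 0))) r)
        ((PySem.List.pyRange 0 w).map (fun _ => (none : Option Int)))) := by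
  induction n with
  | zero =>
      rw [show PySem.List.pyRange 0 ((0 : Nat) : Int) = [] from
            PySem.List.pyRange_one_eq_nil (by simp)]
      simpa using pvRInit w h_ b blocks
  | succ n ih =>
      rw [show ((n + 1 : Nat) : Int) = (n : Int) + 1 from by push_cast; ring,
          PySem.List.pyRange_one_succ_right (by positivity), List.foldl_append,
          List.foldl_cons, List.foldl_nil]
      exact pvRStep w h_ b blocks (n : Int) (by positivity) (by omega) _ (ih (by omega))

-- on the strip of block-row j, the finished template row is exactly the partial gather
theorem pvPCell_strip (w h_ : Int) (C : List (List Int)) (a b : Int) (j x y : Int)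
    (hj : j < (C.length : Int))
    (hx1 : j * a ≤ x) (hx2 : x < min (j * a + (a - 1)) (w - 1)) (hy : 0 ≤ y) :
    pvPCell w h_ C a b (j + 1) 0 x y
      = pvRC h_ b (PySem.List.pyGetD C j []) ((PySem.List.pyGetD C j []).length : Int) y := by
  have ha2 : 2 ≤ a := by omega
  have hja : (j + 1) * a = j * a + a := by ring
  have hdx : PySem.Int.floordiv x a = j :=
    (PySem.Int.floordiv_eq_iff_of_pos (by omega)).2 ⟨hx1, by omega⟩
  unfold pvPCell pvRC
  by_cases hb : 1 ≤ b
  · rw [if_pos ⟨by omega, hb⟩, if_pos hb, hdx]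
    have hi0 : 0 ≤ PySem.Int.floordiv y b := pvFloordiv_nonneg hy (by omega)
    apply if_congr _ rfl rfl
    constructor
    · rintro ⟨-, -, h3, -, h5⟩; exact ⟨by omega, h3, h5⟩
    · rintro ⟨-, h3, h5⟩; exact ⟨Or.inl (by omega), hj, h3, hx2, h5⟩
  · rw [if_neg (fun hc => hb hc.2), if_neg hb]

-- off every strip, advancing the block-row index does not change the gather value
theorem pvPCell_offstrip (w h_ : Int) (C : List (List Int)) (a b : Int) (j x y : Int)
    (hy : 0 ≤ y)
    (hout : ¬(j * a ≤ x ∧ x < min (j * a + (a - 1)) (w - 1))) :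
    pvPCell w h_ C a b (j + 1) 0 x y = pvPCell w h_ C a b j 0 x y := by
  unfold pvPCell
  by_cases hab : 1 ≤ a ∧ 1 ≤ b
  · rw [if_pos hab, if_pos hab]
    apply if_congr _ rfl rfl
    have hi0 : 0 ≤ PySem.Int.floordiv y b := pvFloordiv_nonneg hy (by omega)
    constructor
    · rintro ⟨h1, h⟩
      refine ⟨Or.inl ?_, h⟩
      rcases lt_or_eq_of_le (by omega : PySem.Int.floordiv x a ≤ j) with h' | h'
      · exact h'
      · exfalso
        apply hout
        have hxa : j * a ≤ x := by
          rw [← h']; rw [← PySem.Int.le_floordiv_iff_mul_le (by omega : (0:Int) < a)]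
        rw [h'] at h
        exact ⟨hxa, h.2.2.1⟩
    · rintro ⟨h1, h⟩; exact ⟨Or.inl (by omega), h⟩
  · rw [if_neg hab, if_neg hab]

theorem pvG2_rowset (xb xe x' y : Int) (row : List (Option Int)) (mat : List (List (Option Int)))
    (hxb : 0 ≤ xb) (hx' : 0 ≤ x') :
    pvG2 ((PySem.List.pyRange xb xe).foldl (fun m x => PySem.List.pySetD m x row) mat) x' y =
      (if xb ≤ x' ∧ x' < xe ∧ x' < (mat.length : Int) then pvG1 row y else pvG2 mat x' y) := by
  obtain ⟨n, hn⟩ : ∃ n : Nat, (xe - xb).toNat = n := ⟨_, rfl⟩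
  induction n generalizing xb mat with
  | zero =>
      rw [PySem.List.pyRange_one_eq_nil (by omega)]
      simp only [List.foldl_nil]
      split_ifs with h
      · exfalso; omega
      · rfl
  | succ n ih =>
      rw [PySem.List.pyRange_one_cons (by omega), List.foldl_cons,
          ih (xb + 1) (PySem.List.pySetD mat xb row) (by omega) (by omega),
          PySem.List.length_pySetD]
      unfold pvG2 pvG1
      rw [PySem.List.pySetD_of_nonneg _ _ hxb, pvGetD_nonneg _ _ hx',
          pvGetD_nonneg _ _ hx', getD_set]
      split_ifs <;> first | rfl | (exfalso; omega)

theorem pvRowsetfold_length (L : List Int) (row : List (Option Int)) (mat : List (List (Option Int))) :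
    (L.foldl (fun m x => PySem.List.pySetD m x row) mat).length = mat.length := by
  induction L generalizing mat with
  | nil => rfl
  | cons z L ih => rw [List.foldl_cons, ih, PySem.List.length_pySetD]

theorem pvRowsetfold_rowlen (w : Int) (L : List Int) (row : List (Option Int)) (mat : List (List (Option Int)))
    (hL : ∀ z ∈ L, 0 ≤ z) (hrl : row.length = w.toNat)
    (hrow : ∀ k : Nat, k < mat.length → (mat.getD k []).length = w.toNat) :
    ∀ k : Nat, k < mat.length →
      (((L.foldl (fun m x => PySem.List.pySetD m x row) mat)).getD k []).length = w.toNat := by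
  induction L generalizing mat with
  | nil => exact hrow
  | cons z L ih =>
      intro k hk
      rw [List.foldl_cons]
      refine ih _ (fun u hu => hL u (List.mem_cons_of_mem z hu)) ?_ k ?_
      · intro k' hk'
        rw [PySem.List.length_pySetD] at hk'
        rw [PySem.List.pySetD_of_nonneg _ _ (hL z List.mem_cons_self), getD_set]
        split_ifs with h
        · exact hrl
        · exact hrow k' hk'
      · rw [PySem.List.length_pySetD]; exact hk

theorem pvRC_allempty (h_ b : Int) (blocks : List Int) (y : Int) (hy : 0 ≤ y)
    (hall : ∀ i : Int, 0 ≤ i → i < (blocks.length : Int) →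
      ¬ (i * b < min (i * b + (b - 1)) (h_ - 1))) :
    pvRC h_ b blocks (blocks.length : Int) y = none := by
  unfold pvRC
  by_cases hb : 1 ≤ b
  · rw [if_pos hb, if_neg]
    rintro ⟨-, h2, h3⟩
    have hi0 : 0 ≤ PySem.Int.floordiv y b := pvFloordiv_nonneg hy (by omega)
    have hib : PySem.Int.floordiv y b * b ≤ y :=
      (PySem.Int.le_floordiv_iff_mul_le (by omega : (0:Int) < b)).mp le_rfl
    exact hall _ hi0 h2 (by omega)
  · rw [if_neg hb]

-- on its own strip, block-row j has painted nothing before being processed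
theorem pvPCell_strip_self (w h_ : Int) (C : List (List Int)) (a b : Int) (j x y : Int)
    (hx1 : j * a ≤ x) (hx2 : x < min (j * a + (a - 1)) (w - 1)) (hy : 0 ≤ y) :
    pvPCell w h_ C a b j 0 x y = none := by
  have ha2 : 2 ≤ a := by omega
  have hja : (j + 1) * a = j * a + a := by ring
  have hdx : PySem.Int.floordiv x a = j :=
    (PySem.Int.floordiv_eq_iff_of_pos (by omega)).2 ⟨hx1, by omega⟩
  unfold pvPCell
  by_cases hb : 1 ≤ b
  · rw [if_pos ⟨by omega, hb⟩, if_neg]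
    rintro ⟨hlex, -⟩
    have hi0 : 0 ≤ PySem.Int.floordiv y b := pvFloordiv_nonneg hy (by omega)
    rw [hdx] at hlex
    omega
  · rw [if_neg (fun hc => hb hc.2)]

theorem pvBStep (w h_ : Int) (C : List (List Int)) (a b : Int) (j : Int)
    (hj0 : 0 ≤ j) (hj : j < (C.length : Int))
    (mat : List (List (Option Int))) (hG : pvGood w h_ C a b j 0 mat) :
    pvGood w h_ C a b (j + 1) 0
      (if (PySem.List.pyRange (j * a) (min (j * a + (a - 1)) (w - 1))).isEmpty
          || (PySem.List.pyRange 0 ((PySem.List.pyGetD C j []).length : Int)).all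
               (fun i => (PySem.List.pyRange (i * b) (min (i * b + (b - 1)) (h_ - 1))).isEmpty)
       then mat
       else (PySem.List.pyRange (j * a) (min (j * a + (a - 1)) (w - 1))).foldl
              (fun m x => PySem.List.pySetD m x
                ((PySem.List.pyRange 0 ((PySem.List.pyGetD C j []).length : Int)).foldl
                  (fun r i => (PySem.List.pyRange (i * b) (min (i * b + (b - 1)) (h_ - 1))).foldl
                    (fun r2 y => PySem.List.pySetD r2 y (some (PySem.List.pyGetD (PySem.List.pyGetD C j []) i 0))) r)
                  ((PySem.List.pyRange 0 w).map (fun _ => (none : Option Int))))) mat) := by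
  obtain ⟨hlen, hrowlen, hpt⟩ := hG
  by_cases hse : (PySem.List.pyRange (j * a) (min (j * a + (a - 1)) (w - 1))).isEmpty
  · -- empty strip: nothing happens, and the gather value is off-strip everywhere
    rw [if_pos (by simp [hse])]
    have hnex : ¬ (j * a < min (j * a + (a - 1)) (w - 1)) := by
      intro hlt
      have hm : j * a ∈ PySem.List.pyRange (j * a) (min (j * a + (a - 1)) (w - 1)) :=
        PySem.List.mem_pyRange_one.2 ⟨le_rfl, hlt⟩
      rw [List.isEmpty_iff] at hse
      rw [hse] at hm
      exact absurd hm (List.not_mem_nil)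
    refine ⟨hlen, hrowlen, ?_⟩
    intro x y hx hx2 hy hy2
    rw [hpt x y hx hx2 hy hy2, pvPCell_offstrip w h_ C a b j x y hy (by omega)]
  · by_cases hall : (PySem.List.pyRange 0 ((PySem.List.pyGetD C j []).length : Int)).all
        (fun i => (PySem.List.pyRange (i * b) (min (i * b + (b - 1)) (h_ - 1))).isEmpty)
    · -- nonempty strip but every column segment empty: nothing happens,
      -- and on the strip the new gather value is still none
      rw [if_pos (by simp [hall])]
      have hallP : ∀ i : Int, 0 ≤ i → i < ((PySem.List.pyGetD C j []).length : Int) →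
          ¬ (i * b < min (i * b + (b - 1)) (h_ - 1)) := by
        intro i hi1 hi2 hlt
        have hm : i ∈ PySem.List.pyRange 0 ((PySem.List.pyGetD C j []).length : Int) :=
          PySem.List.mem_pyRange_one.2 ⟨hi1, hi2⟩
        have := List.all_eq_true.mp hall i hm
        rw [List.isEmpty_iff] at this
        have hm2 : i * b ∈ PySem.List.pyRange (i * b) (min (i * b + (b - 1)) (h_ - 1)) :=
          PySem.List.mem_pyRange_one.2 ⟨le_rfl, hlt⟩
        rw [this] at hm2
        exact absurd hm2 (List.not_mem_nil)
      refine ⟨hlen, hrowlen, ?_⟩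
      intro x y hx hx2 hy hy2
      by_cases hin : j * a ≤ x ∧ x < min (j * a + (a - 1)) (w - 1)
      · rw [hpt x y hx hx2 hy hy2,
            pvPCell_strip_self w h_ C a b j x y hin.1 hin.2 hy,
            pvPCell_strip w h_ C a b j x y hj hin.1 hin.2 hy,
            pvRC_allempty h_ b _ y hy hallP]
      · rw [hpt x y hx hx2 hy hy2, pvPCell_offstrip w h_ C a b j x y hy hin]
    · -- the strip is painted with the template row
      rw [if_neg (by simp [hse, hall])]
      have hR : pvRGood w h_ b (PySem.List.pyGetD C j [])
          ((PySem.List.pyGetD C j []).length : Int)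
          ((PySem.List.pyRange 0 ((PySem.List.pyGetD C j []).length : Int)).foldl
            (fun r i => (PySem.List.pyRange (i * b) (min (i * b + (b - 1)) (h_ - 1))).foldl
              (fun r2 y => PySem.List.pySetD r2 y (some (PySem.List.pyGetD (PySem.List.pyGetD C j []) i 0))) r)
            ((PySem.List.pyRange 0 w).map (fun _ => (none : Option Int)))) := by
        simpa using pvRFold w h_ b (PySem.List.pyGetD C j [])
          (PySem.List.pyGetD C j []).length le_rfl
      obtain ⟨hrl, hrpt⟩ := hR
      have hnex : j * a < min (j * a + (a - 1)) (w - 1) := by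
        by_contra hlt
        exact hse (by rw [PySem.List.pyRange_one_eq_nil (by omega)]; simp)
      have ha2 : 2 ≤ a := by omega
      have hxb0 : 0 ≤ j * a := mul_nonneg hj0 (by omega)
      have hmem : ∀ z ∈ PySem.List.pyRange (j * a) (min (j * a + (a - 1)) (w - 1)), 0 ≤ z := by
        intro z hz; rw [PySem.List.mem_pyRange_one] at hz; omega
      refine ⟨by rw [pvRowsetfold_length, hlen], ?_, ?_⟩
      · intro k hk
        rw [pvRowsetfold_length] at hk
        exact pvRowsetfold_rowlen w _ _ _ hmem hrl hrowlen k hk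
      · intro x y hx hx2 hy hy2
        rw [pvG2_rowset _ _ _ _ _ _ hxb0 hx]
        by_cases hin : j * a ≤ x ∧ x < min (j * a + (a - 1)) (w - 1)
        · rw [if_pos ⟨hin.1, hin.2, by rw [hlen]; omega⟩, hrpt y hy hy2,
              pvPCell_strip w h_ C a b j x y hj hin.1 hin.2 hy]
        · rw [if_neg (fun hc => hin ⟨hc.1, hc.2.1⟩), hpt x y hx hx2 hy hy2,
              pvPCell_offstrip w h_ C a b j x y hy hin]

theorem pvBOuterFold (w h_ : Int) (C : List (List Int)) (a b : Int) (n : Nat)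
    (hn : n ≤ C.length)
    (mat : List (List (Option Int))) (hG : pvGood w h_ C a b 0 0 mat) :
    pvGood w h_ C a b (n : Int) 0
      ((PySem.List.pyRange 0 (n : Int)).foldl
        (fun m j =>
          if (PySem.List.pyRange (j * a) (min (j * a + (a - 1)) (w - 1))).isEmpty
              || (PySem.List.pyRange 0 ((PySem.List.pyGetD C j []).length : Int)).all
                   (fun i => (PySem.List.pyRange (i * b) (min (i * b + (b - 1)) (h_ - 1))).isEmpty)
           then m
           else (PySem.List.pyRange (j * a) (min (j * a + (a - 1)) (w - 1))).foldl
                  (fun m2 x => PySem.List.pySetD m2 x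
                    ((PySem.List.pyRange 0 ((PySem.List.pyGetD C j []).length : Int)).foldl
                      (fun r i => (PySem.List.pyRange (i * b) (min (i * b + (b - 1)) (h_ - 1))).foldl
                        (fun r2 y => PySem.List.pySetD r2 y (some (PySem.List.pyGetD (PySem.List.pyGetD C j []) i 0))) r)
                      ((PySem.List.pyRange 0 w).map (fun _ => (none : Option Int))))) m) mat) := by
  induction n with
  | zero =>
      rw [show PySem.List.pyRange 0 ((0 : Nat) : Int) = [] from
            PySem.List.pyRange_one_eq_nil (by simp)]
      simpa using hG
  | succ n ih =>
      rw [show ((n + 1 : Nat) : Int) = (n : Int) + 1 from by push_cast; ring,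
          PySem.List.pyRange_one_succ_right (by positivity), List.foldl_append,
          List.foldl_cons, List.foldl_nil]
      exact pvBStep w h_ C a b (n : Int) (by positivity) (by omega) _ (ih (by omega))

-- rewrite the enumerate-folds of the B port into pyRange-folds
theorem pvAlt_eq_fold (w h_ : Int) (C : List (List Int)) (a b : Int) :
    extrapolate_alt w h_ C a b =
      (PySem.List.pyRange 0 (C.length : Int)).foldl
        (fun m j =>
          if (PySem.List.pyRange (j * a) (min (j * a + (a - 1)) (w - 1))).isEmpty
              || (PySem.List.pyRange 0 ((PySem.List.pyGetD C j []).length : Int)).all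
                   (fun i => (PySem.List.pyRange (i * b) (min (i * b + (b - 1)) (h_ - 1))).isEmpty)
           then m
           else (PySem.List.pyRange (j * a) (min (j * a + (a - 1)) (w - 1))).foldl
                  (fun m2 x => PySem.List.pySetD m2 x
                    ((PySem.List.pyRange 0 ((PySem.List.pyGetD C j []).length : Int)).foldl
                      (fun r i => (PySem.List.pyRange (i * b) (min (i * b + (b - 1)) (h_ - 1))).foldl
                        (fun r2 y => PySem.List.pySetD r2 y (some (PySem.List.pyGetD (PySem.List.pyGetD C j []) i 0))) r)
                      ((PySem.List.pyRange 0 w).map (fun _ => (none : Option Int))))) m)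
        ((PySem.List.pyRange 0 h_).map (fun _ => (PySem.List.pyRange 0 w).map (fun _ => (none : Option Int)))) := by
  unfold extrapolate_alt
  rw [PySem.List.enumerate_eq_map_pyRange C ([] : List Int), List.foldl_map,
      show PySem.List.len C = (C.length : Int) from rfl]
  apply PySem.List.foldl_congr_mem
  intro m j _
  rw [PySem.List.enumerate_eq_map_pyRange (PySem.List.pyGetD C j []) (0 : Int),
      show PySem.List.len (PySem.List.pyGetD C j [])
        = ((PySem.List.pyGetD C j []).length : Int) from rfl]
  simp only [List.map_map, List.all_map, List.foldl_map, Function.comp_def]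

theorem pvMain (w h_ : Int) (C : List (List Int)) (a b : Int) :
    extrapolate w h_ C a b = extrapolate_alt w h_ C a b := by
  obtain ⟨hlenA, hrowA, hptA⟩ :
      pvGood w h_ C a b ((C.length : Nat) : Int) 0 (extrapolate w h_ C a b) :=
    pvOuterFold w h_ C a b C.length le_rfl _ (pvInit w h_ C a b)
  rw [pvAlt_eq_fold]
  obtain ⟨hlenB, hrowB, hptB⟩ :=
    pvBOuterFold w h_ C a b C.length le_rfl _ (pvInit w h_ C a b)
  apply List.ext_getElem
  · rw [hlenA, hlenB]
  · intro k h1 h2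
    have hkh : (k : Int) < h_ := by have := hlenA ▸ h1; omega
    apply List.ext_getElem
    · rw [← List.getD_eq_getElem _ [] h1, ← List.getD_eq_getElem _ [] h2,
          hrowA k h1, hrowB k h2]
    · intro l hl1 hl2
      have hlw : (l : Int) < w := by
        have := hrowA k h1
        rw [← List.getD_eq_getElem _ [] h1] at hl1
        omega
      have hgA := hptA (k : Int) (l : Int) (by positivity) hkh (by positivity) hlw
      have hgB := hptB (k : Int) (l : Int) (by positivity) hkh (by positivity) hlw
      have h := hgA.trans hgB.symm
      unfold pvG2 at h
      rw [PySem.List.pyGetD_natCast, PySem.List.pyGetD_natCast,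
          PySem.List.pyGetD_natCast, PySem.List.pyGetD_natCast,
          List.getD_eq_getElem _ [] h1, List.getD_eq_getElem _ [] h2,
          List.getD_eq_getElem _ none hl1, List.getD_eq_getElem _ none hl2] at h
      exact h

-- ===== VERDICT (by name: the statement is the Claim_ definition above) =====
theorem extrapolate_spec : Claim_equal_extrapolate := by
  intro w h_ C a b _ _
  unfold Spec_extrapolate
  exact pvMain w h_ C a b
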